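-- pv_equiv track=rewrite | github.com/martin-webb/AdventOfCodePython | 2023/day13.py | part1
-- ===== SOURCE A (Python) =====
-- from typing import Generator, Optional
--
-- def transpose(pattern: list[str]) -> list[str]:
--     """
--     >>> transpose([
--     ...     "..##..##.",
--     ...     "..#.##.#.",
--     ...     "##......#",
--     ...     "##......#",
--     ...     "..#.##.#.",
--     ...     "..##..##.",
--     ...     "#.#.##.#."
--     ... ])
--     ['..##..#', '..##...', '##..###', '#....#.', '.#..#.#', '.#..#.#', '#....#.', '##..###', '..##...']  # noqa: E501
--     """
--     transposed = ["".join([pattern[y][x]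
--                   for y in range(len(pattern))])
--                   for x in range(len(pattern[0]))
--                   ]
--     return transposed
--
-- def find_symmetry(
--         pattern: list[str], exclusions: Optional[set[int]] = None) -> int:
--     # Exclusions set added for Part 2.
--     # This is a set of values we don't consider as valid symmetries to return.
--     # A nicer looking solution would be to always support returning ALL
--     # symmetries we find (and filtering out unwanted ones in the caller), but
--     # this way requires less adjustment to the calling code and this can still
--     # be used in Part 1 like this.
--     # NOTE: Although we're using a set here we only expect there to be a single
--     # value and in the Part 2 implementation we only pass in a single-valued
--     # set.
--     # Default value as None due to default mutable arguments behaviour.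
--     if exclusions is None:
--         exclusions = set()
--
--     ymax = len(pattern) - 1
--
--     for b in range(1, len(pattern)):
--         a = b - 1
--         row_a = pattern[a]
--         row_b = pattern[b]
--
--         if row_a != row_b:
--             continue
--
--         for i in range(1, min(a, ymax - b) + 1):
--             assert (a - i >= 0) and (b + i < len(pattern))
--             row_aa = pattern[a - i]
--             row_bb = pattern[b + i]
--             if row_aa != row_bb:
--                 break
--         else:
--             symmetry = a + 1
--             if symmetry not in exclusions:
--                 return symmetry
--
--     return 0
--
-- def part1(input: str) -> int:
--     lines = input.split("\n")
--
--     patterns = []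
--     current_pattern: list[str] = []
--     for line in lines:
--         # Empty rows separate pattern lines
--         if line.strip() == "":
--             patterns.append(current_pattern)
--             current_pattern = list()
--         else:
--             current_pattern.append(line)
--
--     sum = 0
--
--     for pattern in patterns:
--         h = find_symmetry(pattern)
--         transposed = transpose(pattern)
--         v = find_symmetry(transposed)
--         sum += v
--         sum += h * 100
--
--     return sum
-- ===== SOURCE B (Python) =====
-- def part1(input: str) -> int:
--     total = 0
--     segment: list[str] = []
--     for line in input.split("\n"):
--         if line.strip() == "":
--             rows, segment = segment, []
--             n, w = len(rows), len(rows[0])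
--             h = next((b for b in range(1, n)
--                       if sum(rows[b - 1 - i] != rows[b + i]
--                              for i in range(min(b, n - b))) == 0), 0)
--             v = next((b for b in range(1, w)
--                       if sum(r[b - 1 - i] != r[b + i]
--                              for r in rows for i in range(min(b, w - b))) == 0), 0)
--             total += 100 * h + v
--         else:
--             segment.append(line)
--     return total
-- ===== Notes on version B (the rewrite author's own statement) =====
-- stated objective: alternative
-- what changed: Replaces find_symmetry's expand-outward loop (continue/break/for-else) and the explicit transpose step by a single-pass fold over the lines that, at each blank line, picks via next() the first split with a zero mismatch-count over the reflected row pairs, and finds vertical mirrors directly on the columns of every row without building the transposed grid.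
import Mathlib
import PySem

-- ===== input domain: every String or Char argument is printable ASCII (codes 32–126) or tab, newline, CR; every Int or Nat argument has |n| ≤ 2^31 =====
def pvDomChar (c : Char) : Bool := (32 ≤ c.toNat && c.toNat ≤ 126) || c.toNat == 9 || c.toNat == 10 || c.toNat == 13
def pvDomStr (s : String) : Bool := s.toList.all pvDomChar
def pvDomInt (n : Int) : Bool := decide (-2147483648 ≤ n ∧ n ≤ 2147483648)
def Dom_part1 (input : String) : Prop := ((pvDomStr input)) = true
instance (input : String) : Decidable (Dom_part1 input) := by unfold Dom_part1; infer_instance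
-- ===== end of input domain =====

-- B replaces find_symmetry's expand-outward loop (continue/break/for-else) and the transpose step
-- by a single-pass fold that, at each blank line, picks the first split with a zero mismatch-count
-- over rows (and directly over columns); objective: alternative decomposition, equal cost.

-- ===== PORT A =====
-- transpose: "".join of one-char strings is ported as String.ofList of the char list
def transposeA (pattern : List String) : List String :=
  (PySem.List.pyRange 0 (PySem.Str.len (PySem.List.pyGetD pattern 0 "")) 1).map (fun x =>
    String.ofList ((PySem.List.pyRange 0 (pattern.length : Int) 1).map (fun y =>
      PySem.List.pyGetD (PySem.List.pyGetD pattern y "").toList x ' ')))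

-- inner 'for i in …: if mismatch: break / else: …' of find_symmetry, as a Bool ("did not break")
def fsInner (pattern : List String) (a b : Int) : List Int → Bool
  | [] => true
  | i :: rest =>
    if PySem.List.pyGetD pattern (a - i) "" ≠ PySem.List.pyGetD pattern (b + i) "" then false
    else fsInner pattern a b rest

-- outer 'for b in range(1, len(pattern))' of find_symmetry
def fsLoop (pattern : List String) (exclusions : List Int) : List Int → Int
  | [] => 0
  | b :: rest =>
    let a := b - 1
    if PySem.List.pyGetD pattern a "" ≠ PySem.List.pyGetD pattern b "" then
      fsLoop pattern exclusions rest
    else if fsInner pattern a b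
        (PySem.List.pyRange 1 (min a ((pattern.length : Int) - 1 - b) + 1) 1) then
      (if (a + 1) ∈ exclusions then fsLoop pattern exclusions rest else a + 1)
    else fsLoop pattern exclusions rest

def findSymmetry (pattern : List String) (exclusions : List Int) : Int :=
  fsLoop pattern exclusions (PySem.List.pyRange 1 (pattern.length : Int) 1)

def part1 (input : String) : Int :=
  let lines := (PySem.Str.split? input "\n").getD []
  let st := lines.foldl
    (fun (st : List (List String) × List String) line =>
      if PySem.Str.strip line = "" then (st.1 ++ [st.2], [])
      else (st.1, st.2 ++ [line]))
    ([], [])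
  st.1.foldl (fun s pattern =>
    let h := findSymmetry pattern []
    let v := findSymmetry (transposeA pattern) []
    s + v + h * 100) 0

-- ===== PORT B =====
-- mismatch count between the reflected prefix and the suffix at split b, over the rows
def hmis (rows : List String) (n b : Int) : Nat :=
  ((PySem.List.pyRange 0 (min b (n - b)) 1).map (fun i =>
    if PySem.List.pyGetD rows (b - 1 - i) "" ≠ PySem.List.pyGetD rows (b + i) "" then 1 else 0)).sum

-- the same count at a vertical split b, taken directly on the columns of every row
def vmis (rows : List String) (w b : Int) : Nat :=
  (rows.map (fun r =>
    ((PySem.List.pyRange 0 (min b (w - b)) 1).map (fun i =>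
      if PySem.List.pyGetD r.toList (b - 1 - i) ' ' ≠ PySem.List.pyGetD r.toList (b + i) ' '
      then 1 else 0)).sum)).sum

-- next((b for b in … if cnt b == 0), 0)
def nextB (cnt : Int → Nat) : List Int → Int
  | [] => 0
  | b :: rest => if cnt b = 0 then b else nextB cnt rest

def part1_alt (input : String) : Int :=
  (((PySem.Str.split? input "\n").getD []).foldl
    (fun (st : Int × List String) line =>
      if PySem.Str.strip line = "" then
        let rows := st.2
        let n : Int := (rows.length : Int)
        let w : Int := PySem.Str.len (PySem.List.pyGetD rows 0 "")
        let h := nextB (fun b => hmis rows n b) (PySem.List.pyRange 1 n 1)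
        let v := nextB (fun b => vmis rows w b) (PySem.List.pyRange 1 w 1)
        (st.1 + 100 * h + v, [])
      else (st.1, st.2 ++ [line]))
    (0, [])).1

-- ===== PRECONDITION & SPEC =====
-- the blank-line-terminated blocks of the input
def pvSegs (cur : List String) : List String → List (List String)
  | [] => []
  | l :: rest =>
    if PySem.Str.strip l = "" then cur :: pvSegs [] rest else pvSegs (cur ++ [l]) rest

-- Pre_ excludes exactly the inputs where the Python A raises an IndexError: a blank-terminated
-- block that is empty, or one containing a row shorter than its first row (transpose indexes past it).
def Pre_part1 (input : String) : Prop :=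
  ∀ s ∈ pvSegs [] ((PySem.Str.split? input "\n").getD []),
    s ≠ [] ∧ ∀ r ∈ s, PySem.Str.len (s.headD "") ≤ PySem.Str.len r
instance (input : String) : Decidable (Pre_part1 input) := by unfold Pre_part1; infer_instance

def pvWitness_part1 : String := "#.\n#.\n"

def Spec_part1 (input : String) (out : Int) : Prop := out = part1_alt input
instance (input : String) (out : Int) : Decidable (Spec_part1 input out) := by
  unfold Spec_part1; infer_instance

-- ===== CLAIM (what is proved, stated in full; the proofs are below) =====
def Claim_equal_part1 : Prop :=
  ∀ (input : String), Dom_part1 input → Pre_part1 input → Spec_part1 input (part1 input)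

-- ===== LEMMAS AND PROOFS =====

theorem fsInner_eq_true_iff (pattern : List String) (a b : Int) (L : List Int) :
    fsInner pattern a b L = true ↔
      ∀ i ∈ L, PySem.List.pyGetD pattern (a - i) "" = PySem.List.pyGetD pattern (b + i) "" := by
  induction L with
  | nil => simp [fsInner]
  | cons i rest ih =>
    by_cases h : PySem.List.pyGetD pattern (a - i) "" = PySem.List.pyGetD pattern (b + i) ""
    · simp [fsInner, h, ih]
    · simp [fsInner, h]

theorem sum_ite_eq_zero_iff {α : Type} (L : List α) (p : α → Prop) [DecidablePred p] :
    ((L.map (fun i => if p i then 1 else 0)).sum = 0) ↔ ∀ i ∈ L, ¬ p i := by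
  rw [List.sum_eq_zero_iff]
  constructor
  · intro h i hi hp
    have := h 1 (by simp only [List.mem_map]; exact ⟨i, hi, by simp [hp]⟩)
    omega
  · intro h x hx
    simp only [List.mem_map] at hx
    obtain ⟨i, hi, rfl⟩ := hx
    simp [h i hi]

-- A's first-match condition at split b (adjacent rows equal + expand loop completed)
-- coincides with "all min(b, n-b) reflected pairs are equal"
theorem cond_iff (g : Int → String) (n b : Int) (h1 : 1 ≤ b) (h2 : b < n) :
    (g (b - 1) = g b ∧
      ∀ i ∈ PySem.List.pyRange 1 (min (b - 1) (n - 1 - b) + 1) 1, g (b - 1 - i) = g (b + i)) ↔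
    ∀ i ∈ PySem.List.pyRange 0 (min b (n - b)) 1, g (b - 1 - i) = g (b + i) := by
  simp only [PySem.List.mem_pyRange_one]
  constructor
  · rintro ⟨h0, hr⟩ i ⟨hi0, hik⟩
    by_cases hi : i = 0
    · subst hi; simpa using h0
    · exact hr i ⟨by omega, by omega⟩
  · intro h
    refine ⟨by simpa using h 0 ⟨le_refl _, by omega⟩, fun i hi => h i ⟨by omega, by omega⟩⟩

-- generic loop equivalence: A's scan with empty exclusions vs B's first-zero-count scan
theorem fsLoop_eq_nextB (pattern : List String) (cnt : Int → Nat) (L : List Int)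
    (h : ∀ b ∈ L,
      ((PySem.List.pyGetD pattern (b - 1) "" = PySem.List.pyGetD pattern b "") ∧
        fsInner pattern (b - 1) b
          (PySem.List.pyRange 1 (min (b - 1) ((pattern.length : Int) - 1 - b) + 1) 1) = true)
      ↔ cnt b = 0) :
    fsLoop pattern [] L = nextB cnt L := by
  induction L with
  | nil => rfl
  | cons b rest ih =>
    have hb := h b (by simp)
    have hrest := fun b' hb' => h b' (List.mem_cons_of_mem _ hb')
    by_cases hc : cnt b = 0
    · obtain ⟨he, hin⟩ := hb.mpr hc
      simp [fsLoop, nextB, he, hin, hc]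
    · have hcond : ¬ ((PySem.List.pyGetD pattern (b - 1) "" = PySem.List.pyGetD pattern b "") ∧
          fsInner pattern (b - 1) b
            (PySem.List.pyRange 1 (min (b - 1) ((pattern.length : Int) - 1 - b) + 1) 1) = true) :=
        fun hcond => hc (hb.mp hcond)
      by_cases he : PySem.List.pyGetD pattern (b - 1) "" = PySem.List.pyGetD pattern b ""
      · have hin : ¬ fsInner pattern (b - 1) b
            (PySem.List.pyRange 1 (min (b - 1) ((pattern.length : Int) - 1 - b) + 1) 1) = true :=
          fun hi => hcond ⟨he, hi⟩
        simp [fsLoop, nextB, he, hin, hc, ih hrest]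
      · simp [fsLoop, nextB, he, hc, ih hrest]

-- horizontal: find_symmetry on the rows equals the first zero-mismatch split
theorem findSym_eq_h (rows : List String) :
    findSymmetry rows [] = nextB (fun b => hmis rows (rows.length : Int) b)
      (PySem.List.pyRange 1 (rows.length : Int) 1) := by
  apply fsLoop_eq_nextB
  intro b hb
  rw [PySem.List.mem_pyRange_one] at hb
  rw [fsInner_eq_true_iff]
  unfold hmis
  rw [sum_ite_eq_zero_iff]
  simp only [not_not]
  exact cond_iff (fun i => PySem.List.pyGetD rows i "") _ b hb.1 hb.2

theorem length_transposeA (rows : List String) :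
    ((transposeA rows).length : Int) = PySem.Str.len (PySem.List.pyGetD rows 0 "") := by
  have hw : (0 : Int) ≤ PySem.Str.len (PySem.List.pyGetD rows 0 "") := by
    rw [PySem.Str.len_eq]; positivity
  unfold transposeA
  rw [List.length_map, PySem.List.length_pyRange_one]
  omega

-- the x-th transposed row, for 0 ≤ x < w
theorem transposeA_get (rows : List String) (x : Int)
    (h0 : 0 ≤ x) (h1 : x < PySem.Str.len (PySem.List.pyGetD rows 0 "")) :
    PySem.List.pyGetD (transposeA rows) x "" =
      String.ofList ((PySem.List.pyRange 0 (rows.length : Int) 1).map (fun y =>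
        PySem.List.pyGetD (PySem.List.pyGetD rows y "").toList x ' ')) := by
  have hlen : x < ((transposeA rows).length : Int) := by rw [length_transposeA]; exact h1
  rw [PySem.List.pyGetD_eq_getElem _ _ h0 hlen]
  unfold transposeA
  rw [List.getElem_map, PySem.List.getElem_pyRange_one]
  have hx : (0 : Int) + (x.toNat : Int) = x := by omega
  rw [hx]

-- ∀ over row indices ↔ ∀ over rows
theorem forall_rows (rows : List String) (P : String → Prop) :
    (∀ y ∈ PySem.List.pyRange 0 (rows.length : Int) 1, P (PySem.List.pyGetD rows y "")) ↔
      ∀ r ∈ rows, P r := by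
  constructor
  · intro h r hr
    obtain ⟨k, hk, rfl⟩ := List.mem_iff_getElem.mp hr
    have hmem : ((k : Int)) ∈ PySem.List.pyRange 0 (rows.length : Int) 1 := by
      rw [PySem.List.mem_pyRange_one]; omega
    have := h k hmem
    rw [PySem.List.pyGetD_natCast] at this
    rwa [List.getD_eq_getElem rows "" hk] at this
  · intro h y hy
    rw [PySem.List.mem_pyRange_one] at hy
    apply h
    rw [PySem.List.pyGetD_eq_getElem _ _ hy.1 hy.2]
    exact List.getElem_mem _

-- vertical: find_symmetry on the transpose equals B's direct column scan
theorem findSym_eq_v (rows : List String) :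
    findSymmetry (transposeA rows) [] =
      nextB (fun b => vmis rows (PySem.Str.len (PySem.List.pyGetD rows 0 "")) b)
        (PySem.List.pyRange 1 (PySem.Str.len (PySem.List.pyGetD rows 0 "")) 1) := by
  unfold findSymmetry
  rw [length_transposeA]
  apply fsLoop_eq_nextB
  intro b hb
  rw [PySem.List.mem_pyRange_one] at hb
  rw [fsInner_eq_true_iff]
  rw [length_transposeA]
  rw [cond_iff (fun i => PySem.List.pyGetD (transposeA rows) i "") _ b hb.1 hb.2]
  unfold vmis
  rw [List.sum_eq_zero_iff]
  constructor
  · intro h x hx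
    simp only [List.mem_map] at hx
    obtain ⟨r, hr, rfl⟩ := hx
    rw [sum_ite_eq_zero_iff]
    intro i hi hne
    apply hne
    have hib := PySem.List.mem_pyRange_one.mp hi
    have := h i hi
    rw [transposeA_get rows _ (by omega) (by omega),
        transposeA_get rows _ (by omega) (by omega)] at this
    have hmap := String.ofList_inj.mp this
    rw [List.map_inj_left] at hmap
    exact (forall_rows rows (fun s =>
      PySem.List.pyGetD s.toList (b - 1 - i) ' ' = PySem.List.pyGetD s.toList (b + i) ' ')).mp
      hmap r hr
  · intro h i hi
    have hib := PySem.List.mem_pyRange_one.mp hi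
    rw [transposeA_get rows _ (by omega) (by omega),
        transposeA_get rows _ (by omega) (by omega)]
    rw [String.ofList_inj, List.map_inj_left]
    rw [forall_rows rows (fun r =>
      PySem.List.pyGetD r.toList (b - 1 - i) ' ' = PySem.List.pyGetD r.toList (b + i) ' ')]
    intro r hr
    have hsum := h _ (List.mem_map.mpr ⟨r, hr, rfl⟩)
    rw [sum_ite_eq_zero_iff] at hsum
    have := hsum i hi
    simpa using this

-- per appended pattern, A's weighted score equals B's
theorem per_pattern (p : List String) :
    findSymmetry (transposeA p) [] + findSymmetry p [] * 100 =
      100 * nextB (fun b => hmis p (p.length : Int) b) (PySem.List.pyRange 1 (p.length : Int) 1) +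
      nextB (fun b => vmis p (PySem.Str.len (PySem.List.pyGetD p 0 "")) b)
        (PySem.List.pyRange 1 (PySem.Str.len (PySem.List.pyGetD p 0 "")) 1) := by
  rw [findSym_eq_v, findSym_eq_h]; ring

-- A's parse fold only ever appends to the pattern list
theorem foldA_appendOnly (L : List String) : ∀ (qs : List (List String)) (c : List String),
    ∃ tail, (L.foldl
      (fun (st : List (List String) × List String) line =>
        if PySem.Str.strip line = "" then (st.1 ++ [st.2], [])
        else (st.1, st.2 ++ [line])) (qs, c)).1 = qs ++ tail := by
  induction L with
  | nil => intro qs c; exact ⟨[], by simp⟩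
  | cons x xs ihx =>
    intro qs c
    by_cases hx : PySem.Str.strip x = ""
    · obtain ⟨tl, htl⟩ := ihx (qs ++ [c]) []
      refine ⟨[c] ++ tl, ?_⟩
      simp only [List.foldl_cons, if_pos hx]
      rw [htl]; simp
    · obtain ⟨tl, htl⟩ := ihx qs (c ++ [x])
      refine ⟨tl, ?_⟩
      simp only [List.foldl_cons, if_neg hx]
      exact htl

-- the two parse loops, related by one induction: B's running total is A's pattern-list total
theorem fold_eq (lines : List String) : ∀ (t : Int) (ps : List (List String)) (cur : List String),
    (lines.foldl
      (fun (st : Int × List String) line =>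
        if PySem.Str.strip line = "" then
          (st.1 + 100 * nextB (fun b => hmis st.2 (st.2.length : Int) b)
              (PySem.List.pyRange 1 (st.2.length : Int) 1) +
            nextB (fun b => vmis st.2 (PySem.Str.len (PySem.List.pyGetD st.2 0 "")) b)
              (PySem.List.pyRange 1 (PySem.Str.len (PySem.List.pyGetD st.2 0 "")) 1), [])
        else (st.1, st.2 ++ [line])) (t, cur)).1 =
    t + (((lines.foldl
      (fun (st : List (List String) × List String) line =>
        if PySem.Str.strip line = "" then (st.1 ++ [st.2], [])
        else (st.1, st.2 ++ [line])) (ps, cur)).1.drop ps.length).map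
        (fun p => findSymmetry (transposeA p) [] + findSymmetry p [] * 100)).sum := by
  induction lines with
  | nil => intro t ps cur; simp
  | cons l rest ih =>
    intro t ps cur
    by_cases hl : PySem.Str.strip l = ""
    · simp only [List.foldl_cons, if_pos hl]
      rw [ih _ (ps ++ [cur]) []]
      obtain ⟨tl, htl⟩ := foldA_appendOnly rest (ps ++ [cur]) []
      rw [htl, List.drop_left, List.append_assoc, List.drop_left]
      simp only [List.singleton_append, List.map_cons, List.sum_cons]
      rw [per_pattern cur]
      ring
    · simp only [List.foldl_cons, if_neg hl]
      exact ih t ps (cur ++ [l])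

-- A's final summation loop as a map-sum
theorem foldl_score (L : List (List String)) : ∀ (s : Int),
    L.foldl (fun s pattern =>
      let h := findSymmetry pattern []
      let v := findSymmetry (transposeA pattern) []
      s + v + h * 100) s =
    s + (L.map (fun p => findSymmetry (transposeA p) [] + findSymmetry p [] * 100)).sum := by
  induction L with
  | nil => intro s; simp
  | cons p rest ih =>
    intro s
    simp only [List.foldl_cons, List.map_cons, List.sum_cons]
    rw [ih]
    ring

-- ===== VERDICT (by name: the statement is the Claim_ definition above) =====
theorem part1_spec : Claim_equal_part1 := by
  intro input _ _
  show part1 input = part1_alt input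
  have hA : part1 input =
      0 + (((((PySem.Str.split? input "\n").getD []).foldl
        (fun (st : List (List String) × List String) line =>
          if PySem.Str.strip line = "" then (st.1 ++ [st.2], [])
          else (st.1, st.2 ++ [line])) ([], [])).1).map
        (fun p => findSymmetry (transposeA p) [] + findSymmetry p [] * 100)).sum :=
    foldl_score _ 0
  have hB : part1_alt input =
      0 + (((((PySem.Str.split? input "\n").getD []).foldl
        (fun (st : List (List String) × List String) line =>
          if PySem.Str.strip line = "" then (st.1 ++ [st.2], [])
          else (st.1, st.2 ++ [line])) ([], [])).1.drop 0).map
        (fun p => findSymmetry (transposeA p) [] + findSymmetry p [] * 100)).sum :=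
    fold_eq _ 0 [] []
  rw [hA, hB, List.drop_zero]
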